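-- pv_equiv track=rewrite | github.com/vellankis-space/execution-plane | backend/services/langgraph_service.py | _validate_workflow
-- ===== SOURCE A (Python) =====
-- from typing import Dict, Any, List, Optional, Annotated, TypedDict
--
-- def _validate_workflow(steps: List[Dict[str, Any]], dependencies: Dict[str, List[str]]) -> tuple[bool, Optional[str]]:
--     """
--     Validate workflow structure for circular dependencies and missing steps.
--
--     Returns:
--         Tuple of (is_valid, error_message)
--     """
--     if not steps:
--         return False, "No steps defined in workflow"
--
--     step_ids = {step["id"] for step in steps}
--
--     # Check for missing step references in dependencies
--     for step_id, deps in dependencies.items():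
--         if step_id not in step_ids:
--             return False, f"Dependency references non-existent step: {step_id}"
--         for dep in deps:
--             if dep not in step_ids:
--                 return False, f"Step '{step_id}' depends on non-existent step: {dep}"
--
--     # Check for circular dependencies using topological sort approach
--     visited = set()
--     rec_stack = set()
--
--     def has_cycle(node: str) -> bool:
--         visited.add(node)
--         rec_stack.add(node)
--
--         # Get nodes that this node depends on
--         node_deps = dependencies.get(node, [])
--         for dep in node_deps:
--             if dep not in visited:
--                 if has_cycle(dep):
--                     return True
--             elif dep in rec_stack:
--                 return True
--
--         rec_stack.remove(node)
--         return False
--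
--     # Check for cycles starting from each node
--     for step in steps:
--         step_id = step["id"]
--         if step_id not in visited:
--             if has_cycle(step_id):
--                 return False, f"Circular dependency detected involving step: {step_id}"
--
--     return True, None
-- ===== SOURCE B (Python) =====
-- from typing import Dict, Any, List, Optional
--
--
-- def _validate_workflow(steps: List[Dict[str, Any]], dependencies: Dict[str, List[str]]) -> tuple[bool, Optional[str]]:
--     """
--     Validate workflow structure for circular dependencies and missing steps.
--
--     Same result as the recursive version, but cycle detection is an
--     iterative DFS with an explicit stack of (node, remaining-deps) frames
--     and an on-path set, so no recursion is used.
--     """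
--     if not steps:
--         return False, "No steps defined in workflow"
--
--     step_ids = {step["id"] for step in steps}
--
--     # Check for missing step references in dependencies (same scan as before)
--     for step_id, deps in dependencies.items():
--         if step_id not in step_ids:
--             return False, f"Dependency references non-existent step: {step_id}"
--         for dep in deps:
--             if dep not in step_ids:
--                 return False, f"Step '{step_id}' depends on non-existent step: {dep}"
--
--     # Iterative DFS: explicit stack of (node, remaining dependencies) frames.
--     visited = set()
--     on_path = set()
--
--     for step in steps:
--         sid = step["id"]
--         if sid in visited:
--             continue
--         visited.add(sid)
--         on_path.add(sid)
--         stack = [(sid, dependencies.get(sid, []))]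
--         while stack:
--             node, rem = stack[-1]
--             if not rem:
--                 on_path.discard(node)
--                 stack.pop()
--                 continue
--             d, rem = rem[0], rem[1:]
--             stack[-1] = (node, rem)
--             if d not in visited:
--                 visited.add(d)
--                 on_path.add(d)
--                 stack.append((d, dependencies.get(d, [])))
--             elif d in on_path:
--                 return False, f"Circular dependency detected involving step: {sid}"
--
--     return True, None
-- ===== Notes on version B (the rewrite author's own statement) =====
-- stated objective: alternative
-- what changed: The recursive has_cycle DFS (closure over mutable visited/rec_stack sets) is replaced by an iterative DFS over an explicit stack of (node, remaining-dependencies) frames with an on-path set, popping the on-path marker when a frame completes; the reference-validation scan is kept.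
import Mathlib
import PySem

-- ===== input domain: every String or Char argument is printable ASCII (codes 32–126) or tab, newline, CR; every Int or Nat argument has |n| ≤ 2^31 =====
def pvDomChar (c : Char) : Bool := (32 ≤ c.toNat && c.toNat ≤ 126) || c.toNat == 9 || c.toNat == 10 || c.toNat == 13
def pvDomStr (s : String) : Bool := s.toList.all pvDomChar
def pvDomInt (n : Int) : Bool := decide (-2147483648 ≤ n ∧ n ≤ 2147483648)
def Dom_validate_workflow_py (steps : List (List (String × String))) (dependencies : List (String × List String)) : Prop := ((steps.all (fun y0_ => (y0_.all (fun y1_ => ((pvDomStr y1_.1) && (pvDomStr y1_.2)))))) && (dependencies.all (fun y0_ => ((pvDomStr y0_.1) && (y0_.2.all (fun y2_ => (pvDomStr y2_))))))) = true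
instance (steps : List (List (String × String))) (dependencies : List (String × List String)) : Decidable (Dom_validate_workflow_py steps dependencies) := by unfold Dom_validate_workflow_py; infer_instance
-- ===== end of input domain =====

-- B replaces the recursive has_cycle DFS by an iterative DFS over an explicit stack of
-- (node, remaining-dependencies) frames with an on-path set (objective: alternative, same cost);
-- the reference-validation scan is unchanged.  In both Lean ports the fuel parameter is only a
-- termination device for the DFS (Python needs none); it is never exhausted on admitted inputs
-- and the equivalence proof holds for every fuel value.

-- ===== shared small helpers (the same Python expressions occur in both versions) =====

-- step["id"]; total form of the dict lookup, used only under Pre_ (KeyError excluded there)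
def pvGetId (s : List (String × String)) : String :=
  ((PySem.Dict.ofList s).get? "id").getD ""

-- dependencies.get(node, [])
def pvDeps (dependencies : List (String × List String)) (n : String) : List String :=
  (PySem.Dict.ofList dependencies).getD n []

-- {step["id"] for step in steps}
def pvStepIds (steps : List (List (String × String))) : PySem.Set String :=
  steps.foldl (fun acc s => PySem.Set.add acc (pvGetId s)) PySem.Set.empty

-- the reference-validation scan (identical in A and B): inner 'for dep in deps' loop
def pvDepScan (sid : String) (ids : PySem.Set String) : List String → Option String
  | [] => none
  | d :: ds =>
    if PySem.Set.contains ids d = false then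
      some ("Step '" ++ sid ++ "' depends on non-existent step: " ++ d)
    else pvDepScan sid ids ds

-- 'for step_id, deps in dependencies.items()' loop
def pvRefLoop (ids : PySem.Set String) : List (String × List String) → Option String
  | [] => none
  | (sid, ds) :: rest =>
    if PySem.Set.contains ids sid = false then
      some ("Dependency references non-existent step: " ++ sid)
    else
      match pvDepScan sid ids ds with
      | some m => some m
      | none => pvRefLoop ids rest

-- fuel bound: enough for any DFS depth (each nested call visits a fresh node)
def pvTotalDeps (dependencies : List (String × List String)) : Nat :=
  dependencies.foldl (fun a p => a + p.2.length) 0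

-- ===== PORT A =====

-- has_cycle(node): returns (cycle?, visited, rec_stack); fuel decreases at each nested call
mutual
def pvHasCycleA (dependencies : List (String × List String)) :
    Nat → String → PySem.Set String → PySem.Set String →
    Bool × PySem.Set String × PySem.Set String
  | 0, _, V, R => (false, V, R)
  | f + 1, n, V, R =>
    let r := pvCycleDepsA dependencies f (pvDeps dependencies n)
               (PySem.Set.add V n) (PySem.Set.add R n)
    if r.1 then r else (false, r.2.1, PySem.Set.discard r.2.2 n)
termination_by f _ _ _ => (f, 0)

-- the 'for dep in node_deps' loop inside has_cycle
def pvCycleDepsA (dependencies : List (String × List String)) :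
    Nat → List String → PySem.Set String → PySem.Set String →
    Bool × PySem.Set String × PySem.Set String
  | _, [], V, R => (false, V, R)
  | f, d :: ds, V, R =>
    if PySem.Set.contains V d = false then
      let r := pvHasCycleA dependencies f d V R
      if r.1 then r else pvCycleDepsA dependencies f ds r.2.1 r.2.2
    else if PySem.Set.contains R d then (true, V, R)
    else pvCycleDepsA dependencies f ds V R
termination_by f ds _ _ => (f, ds.length + 1)
end

-- 'for step in steps: …' cycle-check loop
def pvOuterA (dependencies : List (String × List String)) (F : Nat) :
    List (List (String × String)) → PySem.Set String → PySem.Set String → Bool × Option String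
  | [], _, _ => (true, none)
  | s :: ss, V, R =>
    let sid := pvGetId s
    if PySem.Set.contains V sid = false then
      let r := pvHasCycleA dependencies F sid V R
      if r.1 then (false, some ("Circular dependency detected involving step: " ++ sid))
      else pvOuterA dependencies F ss r.2.1 r.2.2
    else pvOuterA dependencies F ss V R

def validate_workflow_py (steps : List (List (String × String))) (dependencies : List (String × List String)) : Bool × Option String :=
  if steps.isEmpty then (false, some "No steps defined in workflow")
  else
    match pvRefLoop (pvStepIds steps) (PySem.Dict.ofList dependencies).items with
    | some m => (false, some m)
    | none =>
      pvOuterA dependencies (steps.length + pvTotalDeps dependencies + 1) steps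
        PySem.Set.empty PySem.Set.empty

-- ===== PORT B =====

-- bound on the length of any dependency list, used only by the termination measure below
def pvMaxDeps (dependencies : List (String × List String)) : Nat :=
  dependencies.foldl (fun a p => max a p.2.length) 0

theorem pvFoldlMax_le_of_mem {l : List (String × List String)} {p : String × List String}
    (hp : p ∈ l) : ∀ a : Nat, p.2.length ≤ l.foldl (fun a q => max a q.2.length) a := by
  induction l with
  | nil => cases hp
  | cons q t ih =>
    intro a
    rcases List.mem_cons.mp hp with h | h
    · subst h
      have : ∀ (t : List (String × List String)) (b : Nat),
          b ≤ t.foldl (fun a q => max a q.2.length) b := by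
        intro t
        induction t with
        | nil => intro b; simp
        | cons u t ih2 => intro b; exact le_trans (le_max_left _ _) (ih2 _)
      exact le_trans (le_max_right a p.2.length) (this t _)
    · simp only [List.foldl_cons]; exact ih h _

theorem pvOfList_get?_mem : ∀ (l : List (String × List String))
    (d : PySem.Dict String (List String)) (k : String) (v : List String),
    (l.foldl (fun d p => d.insert p.1 p.2) d).get? k = some v →
    (∃ p ∈ l, p.2 = v) ∨ d.get? k = some v := by
  intro l
  induction l with
  | nil => intro d k v h; exact Or.inr h
  | cons p t ih =>
    intro d k v h
    rcases ih (d.insert p.1 p.2) k v h with h1 | h1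
    · exact Or.inl (by obtain ⟨q, hq, hv⟩ := h1; exact ⟨q, List.mem_cons_of_mem _ hq, hv⟩)
    · rw [PySem.Dict.get?_insert] at h1
      by_cases hk : k = p.1
      · simp [hk] at h1; exact Or.inl ⟨p, List.mem_cons_self, h1⟩
      · simp [hk] at h1; exact Or.inr h1

theorem pvDeps_length_le (dependencies : List (String × List String)) (n : String) :
    (pvDeps dependencies n).length ≤ pvMaxDeps dependencies := by
  unfold pvDeps pvMaxDeps
  rw [PySem.Dict.getD_eq_get?_getD]
  cases hg : (PySem.Dict.ofList dependencies).get? n with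
  | none => simp
  | some v =>
    simp only [Option.getD_some]
    have : (∃ p ∈ dependencies, p.2 = v) ∨ (PySem.Dict.empty : PySem.Dict String (List String)).get? n = some v := by
      apply pvOfList_get?_mem
      simpa [PySem.Dict.ofList, PySem.Dict.update] using hg
    rcases this with ⟨p, hp, hv⟩ | h
    · subst hv; exact pvFoldlMax_le_of_mem hp 0
    · simp [PySem.Dict.get?_empty] at h

-- weight of one stack frame (termination measure only)
def pvFrameW (M : Nat) (fr : Nat × String × List String) : Nat :=
  3 ^ (fr.1 * (M + 1) + fr.2.2.length)

theorem pvPow3_add_lt {a b c : Nat} (ha : a < c) (hb : b < c) : 3 ^ a + 3 ^ b < 3 ^ c := by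
  have h1 : 3 ^ a ≤ 3 ^ (c - 1) := Nat.pow_le_pow_right (by norm_num) (by omega)
  have h2 : 3 ^ b ≤ 3 ^ (c - 1) := Nat.pow_le_pow_right (by norm_num) (by omega)
  have h3 : 3 ^ (c - 1) * 3 = 3 ^ c := by
    rw [← pow_succ]; congr 1; omega
  have h4 : 0 < 3 ^ (c - 1) := Nat.pow_pos (by norm_num)
  omega

-- the four decrease facts for the machine's termination measure, as standalone lemmas
theorem pvDecPop (M f : Nat) (n : String) (rest : List (Nat × String × List String)) :
    (rest.map (pvFrameW M)).sum < (((f, n, ([] : List String)) :: rest).map (pvFrameW M)).sum := by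
  simp only [List.map_cons, List.sum_cons, pvFrameW]
  have : 0 < 3 ^ (f * (M + 1) + ([] : List String).length) := Nat.pow_pos (by norm_num)
  omega

theorem pvDecSkip (M f : Nat) (n d : String) (ds : List String)
    (rest : List (Nat × String × List String)) :
    (((f, n, ds) :: rest).map (pvFrameW M)).sum
      < (((f, n, d :: ds) :: rest).map (pvFrameW M)).sum := by
  simp only [List.map_cons, List.sum_cons, pvFrameW, List.length_cons]
  have h3 : 3 ^ (f * (M + 1) + ds.length) < 3 ^ (f * (M + 1) + (ds.length + 1)) :=
    Nat.pow_lt_pow_right (by norm_num) (by omega)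
  omega

theorem pvDecPush (M g : Nat) (d n : String) (dd ds : List String)
    (rest : List (Nat × String × List String)) (h : dd.length ≤ M) :
    (((g, d, dd) :: (g + 1, n, ds) :: rest).map (pvFrameW M)).sum
      < (((g + 1, n, d :: ds) :: rest).map (pvFrameW M)).sum := by
  simp only [List.map_cons, List.sum_cons, pvFrameW, List.length_cons]
  have hlt := pvPow3_add_lt
    (a := g * (M + 1) + dd.length)
    (b := (g + 1) * (M + 1) + ds.length)
    (c := (g + 1) * (M + 1) + (ds.length + 1))
    (by nlinarith) (by omega)
  omega

-- iterative DFS machine over the explicit stack of (fuel, node, remaining-deps) frames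
def pvMachineB (dependencies : List (String × List String)) :
    List (Nat × String × List String) → PySem.Set String → PySem.Set String →
    Bool × PySem.Set String × PySem.Set String
  | [], V, R => (false, V, R)
  | (_, n, []) :: rest, V, R => pvMachineB dependencies rest V (PySem.Set.discard R n)
  | (f, n, d :: ds) :: rest, V, R =>
    if PySem.Set.contains V d = false then
      match f with
      | 0 => pvMachineB dependencies ((0, n, ds) :: rest) V R
      | g + 1 =>
        pvMachineB dependencies
          ((g, d, pvDeps dependencies d) :: (g + 1, n, ds) :: rest)
          (PySem.Set.add V d) (PySem.Set.add R d)
    else if PySem.Set.contains R d then (true, V, R)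
    else pvMachineB dependencies ((f, n, ds) :: rest) V R
termination_by st _ _ => (st.map (pvFrameW (pvMaxDeps dependencies))).sum
decreasing_by
  · exact pvDecPop (pvMaxDeps dependencies) _ n rest
  · exact pvDecSkip (pvMaxDeps dependencies) 0 n d ds rest
  · exact pvDecPush (pvMaxDeps dependencies) g d n (pvDeps dependencies d) ds rest
      (pvDeps_length_le dependencies d)
  · exact pvDecSkip (pvMaxDeps dependencies) f n d ds rest

-- 'for step in steps: …' cycle-check loop of B: per-frame fuel g for the pushed root frame
def pvOuterB (dependencies : List (String × List String)) (g : Nat) :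
    List (List (String × String)) → PySem.Set String → PySem.Set String → Bool × Option String
  | [], _, _ => (true, none)
  | s :: ss, V, R =>
    let sid := pvGetId s
    if PySem.Set.contains V sid = false then
      let r := pvMachineB dependencies [(g, sid, pvDeps dependencies sid)]
                 (PySem.Set.add V sid) (PySem.Set.add R sid)
      if r.1 then (false, some ("Circular dependency detected involving step: " ++ sid))
      else pvOuterB dependencies g ss r.2.1 r.2.2
    else pvOuterB dependencies g ss V R

def validate_workflow_py_alt (steps : List (List (String × String))) (dependencies : List (String × List String)) : Bool × Option String :=
  if steps.isEmpty then (false, some "No steps defined in workflow")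
  else
    match pvRefLoop (pvStepIds steps) (PySem.Dict.ofList dependencies).items with
    | some m => (false, some m)
    | none =>
      pvOuterB dependencies (steps.length + pvTotalDeps dependencies) steps
        PySem.Set.empty PySem.Set.empty

-- ===== PRECONDITION & SPEC =====
-- Pre_ excludes exactly the inputs where Python raises KeyError: a non-empty steps list
-- containing a step dict without the key "id".
def Pre_validate_workflow_py (steps : List (List (String × String))) (dependencies : List (String × List String)) : Prop :=
  ∀ s ∈ steps, ((PySem.Dict.ofList s).get? "id").isSome = true
instance (steps : List (List (String × String))) (dependencies : List (String × List String)) : Decidable (Pre_validate_workflow_py steps dependencies) := by unfold Pre_validate_workflow_py; infer_instance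

def pvWitness_validate_workflow_py : (List (List (String × String))) × (List (String × List String)) :=
  ([[("id", "a")], [("id", "b")]], [("b", ["a"])])

def Spec_validate_workflow_py (steps : List (List (String × String))) (dependencies : List (String × List String)) (out : Bool × Option String) : Prop := out = validate_workflow_py_alt steps dependencies
instance (steps : List (List (String × String))) (dependencies : List (String × List String)) (out : Bool × Option String) : Decidable (Spec_validate_workflow_py steps dependencies out) := by unfold Spec_validate_workflow_py; infer_instance

-- ===== CLAIM (what is proved, stated in full; the proofs are below) =====
def Claim_equal_validate_workflow_py : Prop := ∀ (steps : List (List (String × String))) (dependencies : List (String × List String)), Dom_validate_workflow_py steps dependencies → Pre_validate_workflow_py steps dependencies → Spec_validate_workflow_py steps dependencies (validate_workflow_py steps dependencies)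

-- ===== LEMMAS AND PROOFS =====

-- the stack machine run on a frame (f, n, ds) :: rest behaves like the dep-loop of has_cycle
-- at fuel f followed (on no cycle) by popping the frame; holds for EVERY fuel value
theorem pvSim (dependencies : List (String × List String)) :
    ∀ (f : Nat) (ds : List String) (n : String) (rest : List (Nat × String × List String))
      (V R : PySem.Set String),
    pvMachineB dependencies ((f, n, ds) :: rest) V R =
      (let r := pvCycleDepsA dependencies f ds V R
       if r.1 then r else pvMachineB dependencies rest r.2.1 (PySem.Set.discard r.2.2 n)) := by
  intro f
  induction f with
  | zero =>
    intro ds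
    induction ds with
    | nil => intro n rest V R; simp [pvMachineB, pvCycleDepsA]
    | cons d ds ih =>
      intro n rest V R
      by_cases hV : d ∈ V
      · by_cases hR : d ∈ R
        · simp [pvMachineB, pvCycleDepsA, hV, hR]
        · simp [pvMachineB, pvCycleDepsA, hV, hR, ih]
      · simp [pvMachineB, pvCycleDepsA, pvHasCycleA, hV, ih]
  | succ g ihf =>
    intro ds
    induction ds with
    | nil => intro n rest V R; simp [pvMachineB, pvCycleDepsA]
    | cons d ds ih =>
      intro n rest V R
      by_cases hV : d ∈ V
      · by_cases hR : d ∈ R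
        · simp [pvMachineB, pvCycleDepsA, hV, hR]
        · simp [pvMachineB, pvCycleDepsA, hV, hR, ih]
      · have hV' : PySem.Set.contains V d = false := by simp [hV]
        have h1 : pvMachineB dependencies ((g + 1, n, d :: ds) :: rest) V R
            = pvMachineB dependencies ((g, d, pvDeps dependencies d) :: (g + 1, n, ds) :: rest)
                (PySem.Set.add V d) (PySem.Set.add R d) := by
          simp [pvMachineB, hV]
        rw [h1, ihf]
        rcases hr : pvCycleDepsA dependencies g (pvDeps dependencies d)
            (PySem.Set.add V d) (PySem.Set.add R d) with ⟨b, V1, R1⟩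
        cases b
        · simp only [hr, pvCycleDepsA, pvHasCycleA, hV', reduceIte]
          simp only [Bool.false_eq_true, if_false]
          rw [ih]
        · simp only [hr, pvCycleDepsA, pvHasCycleA, hV', reduceIte]

-- the two outer loops agree (B at per-frame fuel g simulates A at fuel g+1)
theorem pvOuterEq (dependencies : List (String × List String)) (g : Nat) :
    ∀ (ss : List (List (String × String))) (V R : PySem.Set String),
    pvOuterB dependencies g ss V R = pvOuterA dependencies (g + 1) ss V R := by
  intro ss
  induction ss with
  | nil => intro V R; simp [pvOuterA, pvOuterB]
  | cons s ss ih =>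
    intro V R
    by_cases hV : pvGetId s ∈ V
    · simp [pvOuterA, pvOuterB, hV, ih]
    · have hV' : PySem.Set.contains V (pvGetId s) = false := by simp [hV]
      have hsim := pvSim dependencies g (pvDeps dependencies (pvGetId s)) (pvGetId s) []
        (PySem.Set.add V (pvGetId s)) (PySem.Set.add R (pvGetId s))
      rcases hr : pvCycleDepsA dependencies g (pvDeps dependencies (pvGetId s))
          (PySem.Set.add V (pvGetId s)) (PySem.Set.add R (pvGetId s)) with ⟨b, V1, R1⟩
      rw [hr] at hsim
      simp only [pvOuterA, pvOuterB, pvHasCycleA, hV', reduceIte, hsim, hr]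
      cases b
      · simp [pvMachineB, ih]
      · simp

-- ===== VERDICT (by name: the statement is the Claim_ definition above) =====
theorem validate_workflow_py_spec : Claim_equal_validate_workflow_py := by
  intro steps dependencies _hDom _hPre
  unfold Spec_validate_workflow_py validate_workflow_py validate_workflow_py_alt
  by_cases h : steps.isEmpty
  · simp [h]
  · simp only [h, if_false]
    cases hr : pvRefLoop (pvStepIds steps) (PySem.Dict.ofList dependencies).items with
    | some m => rfl
    | none => exact (pvOuterEq dependencies (steps.length + pvTotalDeps dependencies) steps _ _).symm
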